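-- pv_equiv track=rewrite | github.com/billy-yoyo/AdventOfCode | 2017/day 9/puzzle.py | consume_garbage
-- ===== SOURCE A (Python) =====
-- def consume_garbage(s, start):
--     i = start + 1
--     escaped = False
--     total_escaped = 0
--     while i < len(s):
--         if s[i] == ">" and not escaped:
--             return i, total_escaped
--         elif s[i] == "!" and not escaped:
--             escaped = True
--         elif escaped:
--             total_escaped += 2
--             escaped = False
--         i += 1
--     return len(s), total_escaped
-- ===== SOURCE B (Python) =====
-- def consume_garbage(s, start):
--     # Per-run arithmetic: instead of simulating a per-character escape flag,
--     # measure each maximal run of '!'s and add its escape count by parity in one step.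
--     n = len(s)
--     i = start + 1
--     total = 0
--     while i < n:
--         c = s[i]
--         if c == ">":
--             return i, total
--         if c == "!":
--             k = 1
--             while i + k < n and s[i + k] == "!":
--                 k += 1
--             # run of k consecutive '!'s starting at i
--             if k % 2 == 0:
--                 total += k          # k//2 escaped '!'s inside the run, 2 apiece
--                 i += k              # char after the run (if any) is unescaped
--             elif i + k < n:
--                 total += k + 1      # (k-1)//2 inside the run plus the char after it
--                 i += k + 1
--             else:
--                 total += k - 1      # odd run at end of string: last '!' escapes nothing
--                 i += k
--         else:
--             i += 1
--     return n, total
-- ===== Notes on version B (the rewrite author's own statement) =====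
-- stated objective: faster
-- what changed: Replaces A's per-character escape-flag state machine by a run-based scanner: it measures each maximal run of '!'s and adds the whole run's escape contribution at once by parity arithmetic (even run adds k, odd run followed by a char adds k+1 and skips that char, trailing odd run adds k-1), so no escaped flag is ever simulated.
import Mathlib
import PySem

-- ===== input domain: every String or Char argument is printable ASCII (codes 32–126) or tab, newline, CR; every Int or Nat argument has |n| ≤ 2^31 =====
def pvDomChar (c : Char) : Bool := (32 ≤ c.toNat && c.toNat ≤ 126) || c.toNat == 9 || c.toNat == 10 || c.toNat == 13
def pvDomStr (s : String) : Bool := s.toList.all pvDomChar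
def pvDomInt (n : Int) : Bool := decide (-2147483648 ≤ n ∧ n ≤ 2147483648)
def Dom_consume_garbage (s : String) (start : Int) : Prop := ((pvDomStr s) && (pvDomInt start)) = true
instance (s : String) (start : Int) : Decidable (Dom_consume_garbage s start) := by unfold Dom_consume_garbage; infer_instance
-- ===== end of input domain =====

-- B replaces A's per-character escape-flag state machine by a run-based scanner that adds each
-- maximal '!'-run's escape contribution at once by parity arithmetic; equal return values are
-- proved on all inputs where A does not raise (Pre_ excludes A's IndexError).

-- ===== PORT A =====
-- A's while loop, state (i, escaped, total_escaped); fuel = remaining loop length (len - i).toNat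
-- is only a totality guard (fuel = 0 ↔ i ≥ len at the call sites); (-1,-1) stands for the
-- IndexError branch, unreachable under Pre_.
def consumeGarbageLoopA (cs : List Char) : Nat → Int → Bool → Int → Int × Int
  | 0, _, _, tot => ((cs.length : Int), tot)
  | fuel + 1, i, escaped, tot =>
    match PySem.List.pyGet? cs i with
    | none => (-1, -1)
    | some c =>
      if c = '>' ∧ escaped = false then (i, tot)
      else if c = '!' ∧ escaped = false then consumeGarbageLoopA cs fuel (i + 1) true tot
      else if escaped = true then consumeGarbageLoopA cs fuel (i + 1) false (tot + 2)
      else consumeGarbageLoopA cs fuel (i + 1) escaped tot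

def consume_garbage (s : String) (start : Int) : Int × Int :=
  consumeGarbageLoopA s.toList ((s.toList.length : Int) - (start + 1)).toNat (start + 1) false 0

-- ===== PORT B =====
-- Source B's inner while loop: k += 1 while s[i+k] == '!'; fuel is only a totality guard,
-- none stands for the IndexError branch (unreachable under Pre_).
def consumeGarbageRunB (cs : List Char) : Nat → Int → Int → Option Int
  | 0, _, k => some k
  | f + 1, i, k =>
    if i + k < (cs.length : Int) then
      match PySem.List.pyGet? cs (i + k) with
      | none => none
      | some c => if c = '!' then consumeGarbageRunB cs f i (k + 1) else some k
    else some k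

-- Source B's outer while loop, state (i, total); a '!' consumes its whole run of length k at once,
-- adding k / k+1 / k-1 by parity; fuel again only a totality guard.
def consumeGarbageLoopB (cs : List Char) : Nat → Int → Int → Int × Int
  | 0, _, tot => ((cs.length : Int), tot)
  | fuel + 1, i, tot =>
    match PySem.List.pyGet? cs i with
    | none => (-1, -1)
    | some c =>
      if c = '>' then (i, tot)
      else if c = '!' then
        match consumeGarbageRunB cs fuel i 1 with
        | none => (-1, -1)
        | some k =>
          if PySem.Int.mod k 2 = 0 then
            consumeGarbageLoopB cs (fuel - (k - 1).toNat) (i + k) (tot + k)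
          else if i + k < (cs.length : Int) then
            consumeGarbageLoopB cs (fuel - k.toNat) (i + k + 1) (tot + k + 1)
          else
            consumeGarbageLoopB cs (fuel - (k - 1).toNat) (i + k) (tot + k - 1)
      else consumeGarbageLoopB cs fuel (i + 1) tot

def consume_garbage_alt (s : String) (start : Int) : Int × Int :=
  consumeGarbageLoopB s.toList ((s.toList.length : Int) - (start + 1)).toNat (start + 1) 0

-- ===== PRECONDITION & SPEC =====
-- Pre_ excludes exactly the inputs on which A raises IndexError (first index start+1 below -len(s));
-- B raises there too.
def Pre_consume_garbage (s : String) (start : Int) : Prop :=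
  -(s.toList.length : Int) ≤ start + 1
instance (s : String) (start : Int) : Decidable (Pre_consume_garbage s start) := by
  unfold Pre_consume_garbage; infer_instance

def pvWitness_consume_garbage : String × Int := ("ab!c>", 0)

def Spec_consume_garbage (s : String) (start : Int) (out : Int × Int) : Prop := out = consume_garbage_alt s start
instance (s : String) (start : Int) (out : Int × Int) : Decidable (Spec_consume_garbage s start out) := by unfold Spec_consume_garbage; infer_instance

-- ===== CLAIM (what is proved, stated in full; the proofs are below) =====
def Claim_equal_consume_garbage : Prop := ∀ (s : String) (start : Int), Dom_consume_garbage s start → Pre_consume_garbage s start → Spec_consume_garbage s start (consume_garbage s start)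

-- ===== LEMMAS AND PROOFS =====

-- position with a char is strictly inside the list
lemma pyGet?_some_lt (cs : List Char) (j : Int) (c : Char)
    (h : PySem.List.pyGet? cs j = some c) : j < (cs.length : Int) := by
  by_contra hge
  have : PySem.List.pyGet? cs j = none :=
    (PySem.List.pyGet?_eq_none_iff cs j).mpr (fun hr => by
      have := hr.2; omega)
  simp [this] at h


-- Characterization of B's inner run scanner: with enough fuel it returns k + R where R is the
-- length of the maximal '!'-run starting at position i + k.
lemma consumeGarbageRunB_spec (cs : List Char) : ∀ (f : Nat) (i k : Int),
    -(cs.length : Int) ≤ i + k → i + k ≤ (cs.length : Int) →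
    ((cs.length : Int) - (i + k)).toNat ≤ f →
    ∃ R : Nat, consumeGarbageRunB cs f i k = some (k + R) ∧
      (∀ t : Nat, t < R → PySem.List.pyGet? cs (i + k + t) = some '!') ∧
      i + k + R ≤ (cs.length : Int) ∧
      (i + k + (R : Int) = (cs.length : Int) ∨ PySem.List.pyGet? cs (i + k + R) ≠ some '!') := by
  intro f
  induction f with
  | zero =>
    intro i k hlo hhi hf
    have he : i + k = (cs.length : Int) := by omega
    refine ⟨0, ?_, by omega, by omega, Or.inl (by omega)⟩
    rw [consumeGarbageRunB]
    norm_num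
  | succ f ih =>
    intro i k hlo hhi hf
    by_cases hlt : i + k < (cs.length : Int)
    · obtain ⟨c, hc⟩ : ∃ c, PySem.List.pyGet? cs (i + k) = some c :=
        Option.ne_none_iff_exists'.mp (fun hnone =>
          (PySem.List.pyGet?_eq_none_iff cs (i + k)).mp hnone ⟨hlo, hlt⟩)
      by_cases hbang : c = '!'
      · subst hbang
        obtain ⟨R, hrun, hchars, hle, hbd⟩ := ih i (k + 1) (by omega) (by omega) (by omega)
        refine ⟨R + 1, ?_, ?_, by push_cast; omega, ?_⟩
        · rw [consumeGarbageRunB, if_pos hlt]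
          simp only [hc]
          rw [hrun]
          push_cast; ring_nf
        · intro t ht
          match t with
          | 0 => simpa using hc
          | t' + 1 =>
            have := hchars t' (by omega)
            convert this using 2
            push_cast; ring
        · rcases hbd with h | h
          · exact Or.inl (by push_cast at h ⊢; omega)
          · refine Or.inr ?_
            convert h using 2
            push_cast; ring
      · refine ⟨0, ?_, by omega, by omega, Or.inr ?_⟩
        · rw [consumeGarbageRunB, if_pos hlt]
          simp only [hc, if_neg hbang]
          norm_num
        · push_cast
          rw [add_zero, hc]
          simp [hbang]
    · refine ⟨0, ?_, by omega, by omega, Or.inl (by omega)⟩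
      rw [consumeGarbageRunB, if_neg hlt]
      norm_num

-- A consumes a maximal '!'-run of length m in one of three ways, by parity of m.
lemma consumeGarbageA_run (cs : List Char) : ∀ (m : Nat), ∀ (F : Nat) (i tot : Int),
    F = ((cs.length : Int) - i).toNat → -(cs.length : Int) ≤ i →
    (∀ t : Nat, t < m → PySem.List.pyGet? cs (i + t) = some '!') →
    i + (m : Int) ≤ (cs.length : Int) →
    (i + (m : Int) = (cs.length : Int) ∨ PySem.List.pyGet? cs (i + m) ≠ some '!') →
    consumeGarbageLoopA cs F i false tot =
      (if m % 2 = 0 then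
        consumeGarbageLoopA cs ((cs.length : Int) - (i + m)).toNat (i + m) false (tot + m)
      else if i + (m : Int) < (cs.length : Int) then
        consumeGarbageLoopA cs ((cs.length : Int) - (i + m + 1)).toNat (i + m + 1) false (tot + m + 1)
      else ((cs.length : Int), tot + m - 1)) := by
  intro m
  induction m using Nat.strong_induction_on with
  | _ m ih =>
    match m with
    | 0 =>
      intro F i tot hF _ _ _ _
      norm_num [hF]
    | 1 =>
      intro F i tot hF hlo hchars hhi hbd
      have hc : PySem.List.pyGet? cs i = some '!' := by simpa using hchars 0 (by omega)
      have hiL : i < (cs.length : Int) := pyGet?_some_lt cs i '!' hc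
      obtain ⟨f, hf⟩ : ∃ f, F = f + 1 := ⟨F - 1, by omega⟩
      rw [hf, consumeGarbageLoopA]
      simp only [hc]
      rw [if_neg (by simp), if_pos (by simp)]
      by_cases h1 : i + 1 < (cs.length : Int)
      · obtain ⟨c', hc'⟩ : ∃ c', PySem.List.pyGet? cs (i + 1) = some c' :=
          Option.ne_none_iff_exists'.mp (fun hnone =>
            (PySem.List.pyGet?_eq_none_iff cs (i + 1)).mp hnone ⟨by omega, h1⟩)
        obtain ⟨g, hg⟩ : ∃ g, f = g + 1 := ⟨f - 1, by omega⟩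
        rw [hg, consumeGarbageLoopA]
        simp only [hc']
        rw [if_neg (by simp), if_neg (by simp), if_pos trivial]
        rw [if_neg (by norm_num), if_pos (by push_cast; omega)]
        have e1 : g = ((cs.length : Int) - (i + 1 + 1)).toNat := by omega
        rw [e1]
        norm_num
        ring_nf
      · rw [if_neg (by norm_num), if_neg (by push_cast; omega)]
        obtain rfl : f = 0 := by omega
        rw [consumeGarbageLoopA]
        norm_num
    | t + 2 =>
      intro F i tot hF hlo hchars hhi hbd
      have hc : PySem.List.pyGet? cs i = some '!' := by simpa using hchars 0 (by omega)
      have hc1 : PySem.List.pyGet? cs (i + 1) = some '!' := by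
        simpa using hchars 1 (by omega)
      have hiL : i < (cs.length : Int) := pyGet?_some_lt cs i '!' hc
      have hi1L : i + 1 < (cs.length : Int) := pyGet?_some_lt cs (i+1) '!' hc1
      obtain ⟨f, hf⟩ : ∃ f, F = f + 1 := ⟨F - 1, by omega⟩
      obtain ⟨g, hg⟩ : ∃ g, f = g + 1 := ⟨f - 1, by omega⟩
      rw [hf, consumeGarbageLoopA]
      simp only [hc]
      rw [if_neg (by simp), if_pos (by simp), hg, consumeGarbageLoopA]
      simp only [hc1]
      rw [if_neg (by simp), if_neg (by simp), if_pos trivial]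
      have hrec := ih t (by omega) g (i + 1 + 1) (tot + 2) (by omega) (by omega)
        (fun t' ht' => by
          have := hchars (t' + 2) (by omega)
          convert this using 2
          push_cast; ring)
        (by push_cast at hhi ⊢; omega)
        (by
          rcases hbd with h | h
          · exact Or.inl (by push_cast at h ⊢; omega)
          · refine Or.inr ?_
            convert h using 2
            push_cast; ring)
      rw [hrec]
      have hpar : (t + 2) % 2 = t % 2 := by omega
      rw [hpar]
      by_cases hev : t % 2 = 0
      · rw [if_pos hev, if_pos hev]
        congr 1
        · omega
        · push_cast; ring
        · push_cast; ring
      · rw [if_neg hev, if_neg hev]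
        have hsame : (i + 1 + 1 + (t:Int) < (cs.length:Int)) ↔ (i + ((t+2 : Nat):Int) < (cs.length:Int)) := by
          push_cast; omega
        by_cases hlt2 : i + ((t+2 : Nat):Int) < (cs.length:Int)
        · rw [if_pos (hsame.mpr hlt2), if_pos hlt2]
          congr 1
          · omega
          · push_cast; ring
          · push_cast; ring
        · rw [if_neg (fun h => hlt2 (hsame.mp h)), if_neg hlt2]
          congr 1
          push_cast; ring

-- Main invariant: with the escape flag clear and exact fuel, A's loop equals B's loop.
lemma consumeGarbage_loop_eq (cs : List Char) : ∀ (N : Nat), ∀ (F : Nat) (i tot : Int),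
    F ≤ N → F = ((cs.length : Int) - i).toNat → -(cs.length : Int) ≤ i →
    consumeGarbageLoopA cs F i false tot = consumeGarbageLoopB cs F i tot := by
  intro N
  induction N with
  | zero =>
    intro F i tot hN hF hlo
    obtain rfl : F = 0 := by omega
    rw [consumeGarbageLoopA, consumeGarbageLoopB]
  | succ N ih =>
    intro F i tot hN hF hlo
    match F, hN with
    | 0, _ => rw [consumeGarbageLoopA, consumeGarbageLoopB]
    | f + 1, hN =>
      have hiL : i < (cs.length : Int) := by omega
      obtain ⟨c, hc⟩ : ∃ c, PySem.List.pyGet? cs i = some c :=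
        Option.ne_none_iff_exists'.mp (fun hnone =>
          (PySem.List.pyGet?_eq_none_iff cs i).mp hnone ⟨hlo, hiL⟩)
      by_cases hgt : c = '>'
      · rw [consumeGarbageLoopA, consumeGarbageLoopB]
        simp [hc, hgt]
      · by_cases hbang : c = '!'
        · subst hbang
          rw [consumeGarbageLoopB]
          simp only [hc]
          rw [if_neg hgt, if_pos trivial]
          obtain ⟨R, hrun, hchars, hle, hbd⟩ :=
            consumeGarbageRunB_spec cs f i 1 (by omega) (by omega) (by omega)
          simp only [hrun]
          -- A consumes the run of length R+1 starting at i
          have hArun := consumeGarbageA_run cs (R + 1) (f + 1) i tot (by omega) hlo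
            (fun t ht => by
              match t with
              | 0 => simpa using hc
              | t' + 1 =>
                have := hchars t' (by omega)
                convert this using 2
                push_cast; ring)
            (by push_cast; omega)
            (by
              rcases hbd with h | h
              · exact Or.inl (by push_cast at h ⊢; omega)
              · refine Or.inr ?_
                convert h using 2
                push_cast; ring)
          rw [hArun]
          have hmod : PySem.Int.mod (1 + (R : Int)) 2 = (1 + (R : Int)) % 2 :=
            PySem.Int.mod_eq_emod_of_pos (by norm_num)
          by_cases hev : (R + 1) % 2 = 0
          · rw [if_pos hev,
              if_pos (show PySem.Int.mod (1 + (R:Int)) 2 = 0 by rw [hmod]; omega)]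
            rw [← ih (f - ((1 + (R:Int)) - 1).toNat) (i + (1 + (R:Int))) (tot + (1 + (R:Int)))
              (by omega) (by omega) (by omega)]
            congr 1
            · omega
            · push_cast; ring
            · push_cast; ring
          · rw [if_neg hev,
              if_neg (show ¬ PySem.Int.mod (1 + (R:Int)) 2 = 0 by rw [hmod]; omega)]
            by_cases hlt2 : i + 1 + (R:Int) < (cs.length : Int)
            · rw [if_pos (show i + ((R:Nat) + 1 : Nat) < (cs.length : Int) by push_cast; omega),
                if_pos (show i + (1 + (R:Int)) < (cs.length : Int) by omega)]
              rw [← ih (f - (1 + (R:Int)).toNat) (i + (1 + (R:Int)) + 1) (tot + (1 + (R:Int)) + 1)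
                (by omega) (by omega) (by omega)]
              congr 1
              · omega
              · push_cast; ring
              · push_cast; ring
            · rw [if_neg (show ¬ i + ((R:Nat) + 1 : Nat) < (cs.length : Int) by push_cast; omega),
                if_neg (show ¬ i + (1 + (R:Int)) < (cs.length : Int) by omega)]
              have hz : f - ((1 + (R:Int)) - 1).toNat = 0 := by omega
              rw [hz, consumeGarbageLoopB]
              congr 1
              push_cast; ring
        · rw [consumeGarbageLoopA, consumeGarbageLoopB]
          simp only [hc]
          rw [if_neg (by simp [hgt]), if_neg (by simp [hbang]), if_neg (by simp),
            if_neg hgt, if_neg hbang]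
          exact ih f (i + 1) tot (by omega) (by omega) (by omega)

-- ===== VERDICT (by name: the statement is the Claim_ definition above) =====
theorem consume_garbage_spec : Claim_equal_consume_garbage := by
  intro s start _ hpre
  unfold Spec_consume_garbage consume_garbage consume_garbage_alt
  exact consumeGarbage_loop_eq s.toList _ _ (start + 1) 0 (le_refl _) rfl hpre
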